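-- pv_equiv track=rewrite | github.com/jhollyd/team | SCHEDULING/backend/scheduler/scheduleEngine.py | islands_in_day
-- ===== SOURCE A (Python) =====
-- def islands_in_day(day_bits: str) -> set[tuple]:
--     """Find islands of availability (minimum 1 hour = 4 slots)."""
--     islands = []
--     i = 0
--     while i < len(day_bits):
--         if day_bits[i] == '0':  # Found start of availability
--             start = i
--             while i < len(day_bits) and day_bits[i] == '0':
--                 i += 1
--             end = i - 1
--             if (end - start + 1) >= 4:  # Minimum 1 hour
--                 islands.append((start, end))
--         else:
--             i += 1
--     return islands
-- ===== SOURCE B (Python) =====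
-- def islands_in_day(day_bits: str) -> list:
--     """Islands of availability via boundary detection: collect run starts and
--     run ends of '0'-runs declaratively, pair them up, keep runs of >= 4 slots."""
--     n = len(day_bits)
--     starts = [i for i in range(n)
--               if day_bits[i] == '0' and (i == 0 or day_bits[i - 1] != '0')]
--     ends = [i for i in range(n)
--             if day_bits[i] == '0' and (i == n - 1 or day_bits[i + 1] != '0')]
--     return [(s, e) for s, e in zip(starts, ends) if e - s + 1 >= 4]
-- ===== Notes on version B (the rewrite author's own statement) =====
-- stated objective: alternative
-- what changed: Replaces the nested index-walking while loops with declarative boundary detection: two comprehensions collect the start and end positions of maximal zero-runs, which are zipped and filtered by run length >= 4.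
import Mathlib
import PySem

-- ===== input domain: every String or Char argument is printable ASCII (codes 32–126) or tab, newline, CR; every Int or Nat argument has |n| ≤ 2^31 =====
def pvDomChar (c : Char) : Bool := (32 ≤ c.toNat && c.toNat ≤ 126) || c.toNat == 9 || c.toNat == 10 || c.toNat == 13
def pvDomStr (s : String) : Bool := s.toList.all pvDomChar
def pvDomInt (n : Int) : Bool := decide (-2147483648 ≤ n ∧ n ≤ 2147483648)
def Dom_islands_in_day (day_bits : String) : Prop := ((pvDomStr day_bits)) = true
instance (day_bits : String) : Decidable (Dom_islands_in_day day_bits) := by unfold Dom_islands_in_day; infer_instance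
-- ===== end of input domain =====

-- B replaces A's nested index-walking while loops by declarative boundary detection
-- (comprehensions over run starts / run ends, zipped and length-filtered); alternative, not faster.


-- ===== PORT A =====
-- Both while loops are ported as structural recursion on a fuel argument that
-- bounds the number of remaining iterations (fuel only makes the loop total:
-- l.length - i for the inner loop, l.length + 1 for the outer loop always suffice).

-- inner while loop of A: advance i while the guarded zero-test holds
-- (indexing is exact: day_bits[i] is only read under the bounds guard i < length)
def skipA : Nat → List Char → Nat → Nat
  | 0, _, i => i
  | fuel + 1, l, i => if i < l.length ∧ l.getD i ' ' = '0' then skipA fuel l (i + 1) else i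

-- outer while loop of A
def loopA : Nat → List Char → Nat → List (Int × Int)
  | 0, _, _ => []
  | fuel + 1, l, i =>
    if i < l.length then
      if l.getD i ' ' = '0' then
        let start := i
        let j := skipA (l.length - i) l i
        let rest := loopA fuel l j
        if ((j : Int) - 1) - (start : Int) + 1 ≥ 4 then ((start : Int), (j : Int) - 1) :: rest
        else rest
      else loopA fuel l (i + 1)
    else []

def islands_in_day (day_bits : String) : List (Int × Int) :=
  loopA (day_bits.toList.length + 1) day_bits.toList 0

-- ===== PORT B =====
-- transliteration of Source B: boundary detection + zip + length filter
-- (day_bits[i-1]/[i+1] are read via getD; Source B only reads in-range indices, so getD is exact)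
def islands_in_day_alt (day_bits : String) : List (Int × Int) :=
  let l := day_bits.toList
  let n := l.length
  let starts := (List.range n).filter
    (fun i => (l.getD i ' ' == '0') && ((i == 0) || (l.getD (i - 1) ' ' != '0')))
  let ends := (List.range n).filter
    (fun i => (l.getD i ' ' == '0') && ((i == n - 1) || (l.getD (i + 1) ' ' != '0')))
  ((starts.zip ends).filter (fun p => ((p.2 : Int) - (p.1 : Int) + 1 ≥ 4))).map
    (fun p => ((p.1 : Int), (p.2 : Int)))

-- ===== PRECONDITION & SPEC =====
def Spec_islands_in_day (day_bits : String) (out : List (Int × Int)) : Prop := out = islands_in_day_alt day_bits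
instance (day_bits : String) (out : List (Int × Int)) : Decidable (Spec_islands_in_day day_bits out) := by unfold Spec_islands_in_day; infer_instance

-- ===== CLAIM (what is proved, stated in full; the proofs are below) =====
def Claim_equal_islands_in_day : Prop := ∀ (day_bits : String), Dom_islands_in_day day_bits → Spec_islands_in_day day_bits (islands_in_day day_bits)

-- ===== LEMMAS AND PROOFS =====

-- number of leading zero characters
def leadZ : List Char → Nat
  | [] => 0
  | c :: t => if c = '0' then leadZ t + 1 else 0

theorem leadZ_cons_zero (t : List Char) : leadZ ('0' :: t) = leadZ t + 1 := by simp [leadZ]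

theorem leadZ_cons_ne (c : Char) (t : List Char) (h : c ≠ '0') : leadZ (c :: t) = 0 := by
  simp [leadZ, h]

-- canonical list of (start, end) index pairs of all maximal zero-runs, starting at offset pos
def runs : List Char → Nat → List (Nat × Nat)
  | [], _ => []
  | c :: t, pos =>
    if c = '0' then
      (pos, pos + leadZ t) :: runs (t.drop (leadZ t)) (pos + leadZ t + 1)
    else runs t (pos + 1)
  termination_by l _ => l.length
  decreasing_by
  all_goals (simp only [List.length_drop, List.length_cons]; omega)

theorem runs_cons_zero (t : List Char) (pos : Nat) :
    runs ('0' :: t) pos = (pos, pos + leadZ t) :: runs (t.drop (leadZ t)) (pos + leadZ t + 1) := by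
  simp [runs]

theorem runs_cons_ne (c : Char) (t : List Char) (pos : Nat) (h : c ≠ '0') :
    runs (c :: t) pos = runs t (pos + 1) := by
  simp [runs, h]

theorem leadZ_le (t : List Char) : leadZ t ≤ t.length := by
  induction t with
  | nil => simp [leadZ]
  | cons c t ih => simp only [leadZ]; split <;> simp_all

theorem leadZ_zeros (t : List Char) (q : Nat) (hq : q < leadZ t) : t.getD q ' ' = '0' := by
  induction t generalizing q with
  | nil => simp [leadZ] at hq
  | cons c t ih =>
    simp only [leadZ] at hq
    split at hq
    · cases q with
      | zero => simpa
      | succ q => exact ih q (by omega)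
    · omega

theorem leadZ_max (t : List Char) (h : leadZ t < t.length) : t.getD (leadZ t) ' ' ≠ '0' := by
  induction t with
  | nil => simp at h
  | cons c t ih =>
    by_cases hc : c = '0'
    · subst hc
      rw [leadZ_cons_zero] at h ⊢
      simpa using ih (by simpa using h)
    · rw [leadZ_cons_ne c t hc]
      simpa using hc

theorem getD_drop (l : List Char) (i q : Nat) :
    (l.drop i).getD q ' ' = l.getD (i + q) ' ' := by
  simp [List.getD_eq_getElem?_getD, List.getElem?_drop]

theorem skipA_eq (fuel : Nat) (l : List Char) (i : Nat) (hf : l.length - i ≤ fuel) :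
    skipA fuel l i = i + leadZ (l.drop i) := by
  induction fuel generalizing i with
  | zero =>
    rw [List.drop_eq_nil_of_le (by omega)]
    simp [skipA, leadZ]
  | succ fuel ih =>
    rw [skipA]
    split
    · next h =>
      have hg : l[i] = '0' := by rw [← List.getD_eq_getElem l ' ' h.1]; exact h.2
      rw [ih (i + 1) (by omega), List.drop_eq_getElem_cons h.1, hg, leadZ_cons_zero]
      omega
    · next h =>
      by_cases hi : i < l.length
      · have hg : l[i] ≠ '0' := by
          rw [← List.getD_eq_getElem l ' ' hi]; intro hc; exact h ⟨hi, hc⟩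
        rw [List.drop_eq_getElem_cons hi, leadZ_cons_ne _ _ hg]
        omega
      · rw [List.drop_eq_nil_of_le (by omega)]
        simp [leadZ]

-- A's loop computes: the runs from position i, length-filtered, cast to Int
theorem loopA_eq (fuel : Nat) (l : List Char) (i : Nat) (hf : l.length - i < fuel) :
    loopA fuel l i = ((runs (l.drop i) i).filter (fun p => ((p.2 : Int) - (p.1 : Int) + 1 ≥ 4))).map
      (fun p => ((p.1 : Int), (p.2 : Int))) := by
  induction fuel generalizing i with
  | zero => omega
  | succ fuel ih =>
    rw [loopA]
    split
    · next h =>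
      have hget : l.getD i ' ' = l[i] := List.getD_eq_getElem l ' ' h
      rw [List.drop_eq_getElem_cons h]
      by_cases h0 : l.getD i ' ' = '0'
      · rw [if_pos h0]
        have h0' : l[i] = '0' := by rw [← hget]; exact h0
        have hskip : skipA (l.length - i) l i = i + leadZ (l.drop (i + 1)) + 1 := by
          rw [skipA_eq (l.length - i) l i (by omega), List.drop_eq_getElem_cons h, h0',
            leadZ_cons_zero]
          omega
        set m := leadZ (l.drop (i + 1)) with hm
        rw [hskip, h0', runs_cons_zero, ← hm, List.drop_drop]
        have e1 : i + 1 + m = i + m + 1 := by omega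
        rw [e1, List.filter_cons]
        by_cases hc : m ≥ 3
        · rw [if_pos (by push_cast; omega)]
          rw [if_pos (by simp only [decide_eq_true_eq]; push_cast; omega)]
          rw [List.map_cons, ih (i + m + 1) (by omega)]
          congr 1
          simp only [Prod.mk.injEq]
          refine ⟨trivial, ?_⟩
          push_cast
          ring
        · rw [if_neg (by push_cast; omega)]
          rw [if_neg (by simp only [decide_eq_true_eq]; push_cast; omega)]
          exact ih (i + m + 1) (by omega)
      · rw [if_neg h0]
        have h0' : l[i] ≠ '0' := by rw [← hget]; exact h0
        rw [runs_cons_ne _ _ _ h0']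
        exact ih (i + 1) (by omega)
    · next h =>
      rw [List.drop_eq_nil_of_le (by omega)]
      simp [runs]

-- B's start-boundary and end-boundary predicates
def startP (l : List Char) (i : Nat) : Bool :=
  (l.getD i ' ' == '0') && ((i == 0) || (l.getD (i - 1) ' ' != '0'))

def endP (l : List Char) (i : Nat) : Bool :=
  (l.getD i ' ' == '0') && ((i == l.length - 1) || (l.getD (i + 1) ' ' != '0'))

theorem startP_true_iff (l : List Char) (i : Nat) :
    startP l i = true ↔ (l.getD i ' ' = '0' ∧ (i = 0 ∨ l.getD (i - 1) ' ' ≠ '0')) := by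
  simp [startP]

theorem endP_true_iff (l : List Char) (i : Nat) :
    endP l i = true ↔ (l.getD i ' ' = '0' ∧ (i = l.length - 1 ∨ l.getD (i + 1) ' ' ≠ '0')) := by
  simp [endP]

theorem range'_split (a m k : Nat) (h : m ≤ k) :
    List.range' a k = List.range' a m ++ List.range' (a + m) (k - m) := by
  have h2 := @List.range'_append a m (k - m) 1
  simp only [one_mul] at h2
  rw [show m + (k - m) = k from by omega] at h2
  exact h2.symm

theorem starts_from (l : List Char) (i : Nat)
    (hP : i = 0 ∨ l.getD (i - 1) ' ' ≠ '0' ∨ l.length ≤ i ∨ l.getD i ' ' ≠ '0') :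
    (List.range' i (l.length - i)).filter (startP l) = (runs (l.drop i) i).map Prod.fst := by
  by_cases h : i < l.length
  case neg =>
    rw [List.drop_eq_nil_of_le (by omega), show l.length - i = 0 from by omega]
    simp [runs]
  case pos =>
  have hget : l.getD i ' ' = l[i] := List.getD_eq_getElem l ' ' h
  rw [List.drop_eq_getElem_cons h, show l.length - i = (l.length - (i + 1)) + 1 from by omega,
    List.range'_succ]
  by_cases h0 : l.getD i ' ' = '0'
  · have h0' : l[i] = '0' := by rw [← hget]; exact h0
    rw [h0', runs_cons_zero]
    set m := leadZ (l.drop (i + 1)) with hm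
    have hmle : m ≤ l.length - (i + 1) := by
      have := leadZ_le (l.drop (i + 1)); simpa using this
    have hzeros : ∀ p, i ≤ p → p < i + m + 1 → l.getD p ' ' = '0' := by
      intro p hp1 hp2
      rcases Nat.eq_or_lt_of_le hp1 with rfl | hlt
      · exact h0
      · rw [show p = i + 1 + (p - (i + 1)) from by omega, ← getD_drop]
        exact leadZ_zeros _ _ (by omega)
    have hmax : i + m + 1 < l.length → l.getD (i + m + 1) ' ' ≠ '0' := by
      intro hlt
      rw [show i + m + 1 = i + 1 + m from by omega, ← getD_drop]
      exact leadZ_max _ (by simp only [List.length_drop]; omega)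
    rw [List.filter_cons]
    have hstart : startP l i = true := by
      rw [startP_true_iff]
      refine ⟨h0, ?_⟩
      rcases hP with rfl | hprev | hge | hne
      · exact Or.inl rfl
      · exact Or.inr hprev
      · omega
      · exact absurd h0 hne
    rw [if_pos hstart, List.map_cons, List.drop_drop,
      show i + 1 + m = i + m + 1 from by omega]
    congr 1
    rw [range'_split (i + 1) m (l.length - (i + 1)) hmle, List.filter_append]
    have hnil : (List.range' (i + 1) m).filter (startP l) = [] := by
      rw [List.filter_eq_nil_iff]
      intro p hp
      obtain ⟨hp1, hp2⟩ := List.mem_range'_1.mp hp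
      have hzp : l.getD p ' ' = '0' := hzeros p (by omega) (by omega)
      have hzprev : l.getD (p - 1) ' ' = '0' := hzeros (p - 1) (by omega) (by omega)
      have hp0 : p ≠ 0 := by omega
      rw [startP_true_iff]
      rintro ⟨-, rfl | hne⟩
      · exact hp0 rfl
      · exact hne hzprev
    rw [hnil, List.nil_append,
      show i + 1 + m = i + m + 1 from by omega,
      show l.length - (i + 1) - m = l.length - (i + m + 1) from by omega]
    exact starts_from l (i + m + 1)
      (by
        by_cases h' : l.length ≤ i + m + 1
        · exact Or.inr (Or.inr (Or.inl h'))
        · exact Or.inr (Or.inr (Or.inr (hmax (by omega)))))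
  · have h0' : l[i] ≠ '0' := by rw [← hget]; exact h0
    rw [runs_cons_ne _ _ _ h0', List.filter_cons,
      if_neg (fun hx => h0 ((startP_true_iff l i).mp hx).1)]
    exact starts_from l (i + 1) (Or.inr (Or.inl h0))
  termination_by l.length - i
  decreasing_by all_goals omega

theorem ends_from (l : List Char) (i : Nat) :
    (List.range' i (l.length - i)).filter (endP l) = (runs (l.drop i) i).map Prod.snd := by
  by_cases h : i < l.length
  case neg =>
    rw [List.drop_eq_nil_of_le (by omega), show l.length - i = 0 from by omega]
    simp [runs]
  case pos =>
  have hget : l.getD i ' ' = l[i] := List.getD_eq_getElem l ' ' h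
  rw [List.drop_eq_getElem_cons h]
  by_cases h0 : l.getD i ' ' = '0'
  · have h0' : l[i] = '0' := by rw [← hget]; exact h0
    rw [h0', runs_cons_zero]
    set m := leadZ (l.drop (i + 1)) with hm
    have hmle : m ≤ l.length - (i + 1) := by
      have := leadZ_le (l.drop (i + 1)); simpa using this
    have hzeros : ∀ p, i ≤ p → p < i + m + 1 → l.getD p ' ' = '0' := by
      intro p hp1 hp2
      rcases Nat.eq_or_lt_of_le hp1 with rfl | hlt
      · exact h0
      · rw [show p = i + 1 + (p - (i + 1)) from by omega, ← getD_drop]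
        exact leadZ_zeros _ _ (by omega)
    have hmax : i + m + 1 < l.length → l.getD (i + m + 1) ' ' ≠ '0' := by
      intro hlt
      rw [show i + m + 1 = i + 1 + m from by omega, ← getD_drop]
      exact leadZ_max _ (by simp only [List.length_drop]; omega)
    rw [range'_split i m (l.length - i) (by omega), List.filter_append]
    have hnil : (List.range' i m).filter (endP l) = [] := by
      rw [List.filter_eq_nil_iff]
      intro p hp
      obtain ⟨hp1, hp2⟩ := List.mem_range'_1.mp hp
      have hznext : l.getD (p + 1) ' ' = '0' := hzeros (p + 1) (by omega) (by omega)
      have hpn : p ≠ l.length - 1 := by omega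
      rw [endP_true_iff]
      rintro ⟨-, rfl | hne⟩
      · exact hpn rfl
      · exact hne hznext
    rw [hnil, List.nil_append,
      show l.length - i - m = (l.length - (i + m + 1)) + 1 from by omega,
      List.range'_succ, List.filter_cons]
    have hend : endP l (i + m) = true := by
      have hz : l.getD (i + m) ' ' = '0' := hzeros (i + m) (by omega) (by omega)
      rw [endP_true_iff]
      refine ⟨hz, ?_⟩
      by_cases h' : i + m + 1 < l.length
      · exact Or.inr (hmax h')
      · exact Or.inl (by omega)
    rw [if_pos hend, List.map_cons, List.drop_drop,
      show i + 1 + m = i + m + 1 from by omega,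
      show i + m + 1 = i + m + 1 from rfl]
    congr 1
    · exact ends_from l (i + m + 1)
  · have h0' : l[i] ≠ '0' := by rw [← hget]; exact h0
    rw [runs_cons_ne _ _ _ h0',
      show l.length - i = (l.length - (i + 1)) + 1 from by omega,
      List.range'_succ, List.filter_cons, if_neg (fun hx => h0 ((endP_true_iff l i).mp hx).1)]
    exact ends_from l (i + 1)
  termination_by l.length - i
  decreasing_by all_goals omega

theorem zip_fst_snd {α β : Type} (R : List (α × β)) :
    (R.map Prod.fst).zip (R.map Prod.snd) = R := by
  induction R with
  | nil => rfl
  | cons p t ih => simp [ih]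

-- ===== VERDICT (by name: the statement is the Claim_ definition above) =====
theorem islands_in_day_spec : Claim_equal_islands_in_day := by
  intro day_bits _
  unfold Spec_islands_in_day islands_in_day islands_in_day_alt
  set l := day_bits.toList
  have hs : (List.range l.length).filter
      (fun i => (l.getD i ' ' == '0') && ((i == 0) || (l.getD (i - 1) ' ' != '0')))
      = (runs l 0).map Prod.fst := by
    have := starts_from l 0 (Or.inl rfl)
    simpa [List.range_eq_range', startP] using this
  have he : (List.range l.length).filter
      (fun i => (l.getD i ' ' == '0') && ((i == l.length - 1) || (l.getD (i + 1) ' ' != '0')))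
      = (runs l 0).map Prod.snd := by
    have := ends_from l 0
    simpa [List.range_eq_range', endP] using this
  simp only [hs, he, zip_fst_snd]
  have := loopA_eq (l.length + 1) l 0 (by omega)
  simpa using this
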